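-- pv_equiv track=rewrite | github.com/r4k5O/coocle | backend/newsletter_templates.py | detect_subscriber_milestone
-- ===== SOURCE A (Python) =====
-- MILESTONE_SUBSCRIBER_THRESHOLDS = [10, 25, 50, 100, 250, 500, 1000, 2500, 5000]
--
-- def detect_subscriber_milestone(current_count: int, last_milestone: int | None) -> int | None:
--     threshold = 0
--     for t in MILESTONE_SUBSCRIBER_THRESHOLDS:
--         if t > current_count:
--             break
--         if last_milestone is not None and t <= last_milestone:
--             continue
--         threshold = t
--     return threshold if threshold > 0 else None
-- ===== SOURCE B (Python) =====
-- import bisect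
--
-- MILESTONE_SUBSCRIBER_THRESHOLDS = [10, 25, 50, 100, 250, 500, 1000, 2500, 5000]
--
-- def detect_subscriber_milestone(current_count: int, last_milestone: int | None) -> int | None:
--     idx = bisect.bisect_right(MILESTONE_SUBSCRIBER_THRESHOLDS, current_count)
--     if idx == 0:
--         return None
--     cand = MILESTONE_SUBSCRIBER_THRESHOLDS[idx - 1]
--     if last_milestone is not None and cand <= last_milestone:
--         return None
--     return cand
-- ===== Notes on version B (the rewrite author's own statement) =====
-- stated objective: simpler
-- what changed: Replaces the accumulating linear scan with a bisect_right lookup of the highest threshold not exceeding current_count, followed by a single O(1) comparison against last_milestone.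
import Mathlib
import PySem

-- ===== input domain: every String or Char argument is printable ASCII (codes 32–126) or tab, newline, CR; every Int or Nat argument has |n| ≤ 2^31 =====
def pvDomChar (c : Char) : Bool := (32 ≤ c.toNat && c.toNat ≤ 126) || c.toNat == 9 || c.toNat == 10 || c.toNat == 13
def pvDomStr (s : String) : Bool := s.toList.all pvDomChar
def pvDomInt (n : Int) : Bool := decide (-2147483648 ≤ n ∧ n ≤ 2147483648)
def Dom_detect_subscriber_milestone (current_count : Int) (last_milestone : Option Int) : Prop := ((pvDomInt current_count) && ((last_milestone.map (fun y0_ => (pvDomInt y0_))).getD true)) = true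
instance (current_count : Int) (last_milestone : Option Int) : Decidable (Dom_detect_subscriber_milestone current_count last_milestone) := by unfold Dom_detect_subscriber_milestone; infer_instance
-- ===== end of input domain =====

-- B replaces A's accumulating linear scan with a bisect_right lookup of the highest crossed threshold and one comparison (objective: simpler).

-- ===== PORT A =====
def pvThresholds : List Int := [10, 25, 50, 100, 250, 500, 1000, 2500, 5000]

-- A's for-loop with break/continue, accumulator `threshold`
def pvLoopA (current_count : Int) (last_milestone : Option Int) : List Int → Int → Int
  | [], threshold => threshold
  | t :: rest, threshold =>
    if t > current_count then threshold
    else if (match last_milestone with | some m => decide (t ≤ m) | none => false) then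
      pvLoopA current_count last_milestone rest threshold
    else
      pvLoopA current_count last_milestone rest t

def detect_subscriber_milestone (current_count : Int) (last_milestone : Option Int) : Option Int :=
  let threshold := pvLoopA current_count last_milestone pvThresholds 0
  if threshold > 0 then some threshold else none

-- ===== PORT B =====
-- bisect.bisect_right ported as the corresponding function on the sorted list: the length of the ≤-x prefix
def pvBisectRight (l : List Int) (x : Int) : Nat := (l.takeWhile (fun t => t ≤ x)).length

def detect_subscriber_milestone_alt (current_count : Int) (last_milestone : Option Int) : Option Int :=
  let idx := pvBisectRight pvThresholds current_count
  if idx = 0 then none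
  else
    match PySem.List.pyGet? pvThresholds (↑(idx - 1)) with
    | none => none
    | some cand =>
      if (match last_milestone with | some m => decide (cand ≤ m) | none => false) then none
      else some cand

-- ===== PRECONDITION & SPEC =====
def Spec_detect_subscriber_milestone (current_count : Int) (last_milestone : Option Int) (out : Option Int) : Prop := out = detect_subscriber_milestone_alt current_count last_milestone
instance (current_count : Int) (last_milestone : Option Int) (out : Option Int) : Decidable (Spec_detect_subscriber_milestone current_count last_milestone out) := by unfold Spec_detect_subscriber_milestone; infer_instance

-- ===== CLAIM (what is proved, stated in full; the proofs are below) =====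
def Claim_equal_detect_subscriber_milestone : Prop := ∀ (current_count : Int) (last_milestone : Option Int), Dom_detect_subscriber_milestone current_count last_milestone → Spec_detect_subscriber_milestone current_count last_milestone (detect_subscriber_milestone current_count last_milestone)

-- ===== LEMMAS AND PROOFS =====

-- the loop only sees the ≤-c prefix of the list (break at the first t > c)
theorem loopA_takeWhile (c : Int) (lm : Option Int) (l : List Int) (acc : Int) :
    pvLoopA c lm l acc = pvLoopA c lm (l.takeWhile (fun t => t ≤ c)) acc := by
  induction l generalizing acc with
  | nil => rfl
  | cons t rest ih =>
    by_cases h : t ≤ c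
    · have : (t :: rest).takeWhile (fun t => decide (t ≤ c)) =
        t :: rest.takeWhile (fun t => decide (t ≤ c)) := by simp [h]
      rw [this]
      show pvLoopA c lm (t :: rest) acc = pvLoopA c lm (t :: _) acc
      simp only [pvLoopA, if_neg (by omega : ¬ t > c)]
      split_ifs
      · exact ih acc
      · exact ih t
    · have : (t :: rest).takeWhile (fun t => decide (t ≤ c)) = [] := by simp [h]
      rw [this]
      simp [pvLoopA, if_pos (by omega : t > c)]

-- when no break fires (all elements ≤ c) and last_milestone is None, the accumulator ends as the last element
theorem loopA_none (c : Int) (l : List Int) (acc : Int) (hall : ∀ t ∈ l, t ≤ c) :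
    pvLoopA c none l acc = l.getLast?.getD acc := by
  induction l generalizing acc with
  | nil => rfl
  | cons t rest ih =>
    have ht : ¬ t > c := by have := hall t (by simp); omega
    have hrest := fun x hx => hall x (List.mem_cons_of_mem _ hx)
    simp only [pvLoopA, if_neg ht, Bool.false_eq_true, if_false, ih _ hrest]
    cases rest with
    | nil => rfl
    | cons u us =>
      rw [List.getLast?_cons_cons]
      cases hL : (u :: us).getLast? with
      | none => simp at hL
      | some w => rfl

-- when no break fires and last_milestone = m: on a sorted list the accumulator ends as the
-- last element if it exceeds m, else it is never written
theorem loopA_some (c m : Int) (l : List Int) (acc : Int) (hall : ∀ t ∈ l, t ≤ c)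
    (hsort : l.Pairwise (· < ·)) :
    pvLoopA c (some m) l acc =
      (match l.getLast? with
       | none => acc
       | some t => if t ≤ m then acc else t) := by
  induction l generalizing acc with
  | nil => rfl
  | cons t rest ih =>
    have ht : ¬ t > c := by have := hall t (by simp); omega
    have hrest := fun x hx => hall x (List.mem_cons_of_mem _ hx)
    have hsr := hsort.of_cons
    simp only [pvLoopA, if_neg ht, decide_eq_true_eq]
    cases hrest' : rest with
    | nil =>
      subst hrest'
      simp [pvLoopA]
    | cons u us =>
      subst hrest'
      rw [List.getLast?_cons_cons]
      by_cases htm : t ≤ m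
      · rw [if_pos htm, ih _ hrest hsr]
      · rw [if_neg htm, ih _ hrest hsr]
        cases hL : (u :: us).getLast? with
        | none => simp at hL
        | some w =>
          have hw : w ∈ u :: us := List.mem_of_getLast? hL
          have htw : t < w := (List.pairwise_cons.mp hsort).1 w hw
          simp only []
          split_ifs with h1 <;> omega

-- B's candidate lookup is the last element of the ≤-c prefix
theorem pyGet?_eq_getLast? (c : Int) (l1 : List Int)
    (h1 : l1 = pvThresholds.takeWhile (fun t => t ≤ c)) (hne : l1 ≠ []) :
    PySem.List.pyGet? pvThresholds (↑(l1.length - 1)) = l1.getLast? := by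
  have hpre : l1 <+: pvThresholds := h1 ▸ List.takeWhile_prefix _
  obtain ⟨s, hs⟩ := hpre
  have hlen : l1.length - 1 < l1.length := by
    cases l1 with | nil => exact absurd rfl hne | cons a as => simp
  rw [PySem.List.pyGet?_natCast, List.getLast?_eq_getElem?, ← hs,
    List.getElem?_append_left hlen]

theorem detect_subscriber_milestone_eq (c : Int) (lm : Option Int) :
    detect_subscriber_milestone c lm = detect_subscriber_milestone_alt c lm := by
  have hall : ∀ t ∈ pvThresholds.takeWhile (fun t => t ≤ c), t ≤ c := by
    intro t ht
    simpa using List.mem_takeWhile_imp ht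
  have hsort : (pvThresholds.takeWhile (fun t => t ≤ c)).Pairwise (· < ·) :=
    (by decide : pvThresholds.Pairwise (· < ·)).sublist (List.takeWhile_sublist _)
  have hpos : ∀ t ∈ pvThresholds.takeWhile (fun t => t ≤ c), 0 < t := by
    intro t ht
    exact (by decide : ∀ t ∈ pvThresholds, 0 < t) t ((List.takeWhile_sublist _).mem ht)
  unfold detect_subscriber_milestone detect_subscriber_milestone_alt pvBisectRight
  rw [loopA_takeWhile]
  cases hT : pvThresholds.takeWhile (fun t => t ≤ c) with
  | nil =>
    cases lm <;> simp [pvLoopA]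
  | cons a as =>
    have hne : pvThresholds.takeWhile (fun t => t ≤ c) ≠ [] := by rw [hT]; simp
    have hlenpos : (pvThresholds.takeWhile (fun t => t ≤ c)).length ≠ 0 := by
      rw [hT]; simp
    obtain ⟨w, hw⟩ : ∃ w, (pvThresholds.takeWhile (fun t => t ≤ c)).getLast? = some w := by
      rw [hT]; exact ⟨_, rfl⟩
    have hwmem : w ∈ pvThresholds.takeWhile (fun t => t ≤ c) := List.mem_of_getLast? hw
    have hwpos : 0 < w := hpos w hwmem
    have hget := pyGet?_eq_getLast? c _ rfl hne
    rw [← hT]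
    simp only [if_neg hlenpos, hget, hw]
    cases lm with
    | none =>
      rw [loopA_none c _ 0 hall, hw]
      simp [hwpos]
    | some m =>
      rw [loopA_some c m _ 0 hall hsort, hw]
      by_cases hm : w ≤ m
      · simp [hm]
      · simp [hm, hwpos]

-- ===== VERDICT (by name: the statement is the Claim_ definition above) =====
theorem detect_subscriber_milestone_spec : Claim_equal_detect_subscriber_milestone := by
  intro c lm _
  exact detect_subscriber_milestone_eq c lm
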